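-- pv_equiv track=rewrite | github.com/vishwesh-vishwesh/Logic_Py | basic_gates.py | NOT
-- ===== SOURCE A (Python) =====
-- def binary_check(A,B):
--     #args = list(args)
--     #ans = []
--     for i in range(len(A)):
--         if A[i] == 1 or A[i] == 0:
--             pass
--             if B[i] == 1 or B[i] == 0:
--                 pass
--             else:
--                 raise ValueError("input must be binary, 0 or 1 in second input index %d"%i)
--         else:
--             raise ValueError("input must be binary, 0 or  1 in first input index %d"%i)
--
-- def NOT (A):
--     """realisation of NOT gate
--
--     Parameters
--     ----------
--     A : list[]
--         0 or 1
--
--     Returns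
--     -------
--     result : list[]
--
--     """
--     binary_check(A,A)
--     result=[]
--     for i in range(len(A)):
--
--         if A[i] == 1:
--             result.append(0)
--         else:
--             result.append(1)
--     return result
-- ===== SOURCE B (Python) =====
-- def NOT(A):
--     result = []
--     for i, x in enumerate(A):
--         if x != 0 and x != 1:
--             raise ValueError("input must be binary, 0 or  1 in first input index %d" % i)
--         result.append(1 - x)
--     return result
-- ===== Notes on version B (the rewrite author's own statement) =====
-- stated objective: simpler
-- what changed: Fuses the separate binary_check validation pass and the branching inversion pass into one enumerate loop that raises on the first non-binary element and otherwise appends 1 - x (arithmetic instead of an if/else).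
import Mathlib
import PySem

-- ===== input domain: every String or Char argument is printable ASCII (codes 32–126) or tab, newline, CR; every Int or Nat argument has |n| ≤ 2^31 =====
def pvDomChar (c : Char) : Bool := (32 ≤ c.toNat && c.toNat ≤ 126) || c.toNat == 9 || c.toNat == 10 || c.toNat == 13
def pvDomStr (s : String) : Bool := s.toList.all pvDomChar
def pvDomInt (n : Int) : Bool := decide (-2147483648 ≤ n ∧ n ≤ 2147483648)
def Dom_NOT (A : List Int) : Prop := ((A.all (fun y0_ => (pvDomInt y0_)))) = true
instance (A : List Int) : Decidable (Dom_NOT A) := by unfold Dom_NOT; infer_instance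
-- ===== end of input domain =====

-- B fuses A's separate binary_check pass and inversion pass into one loop computing 1 - x;
-- equivalence of return values is proved on Pre_NOT (the inputs where A raises no ValueError).

-- ===== PORT A =====
-- binary_check(A,B): returns true iff the loop finishes without raising
def binaryCheck (A B : List Int) : Bool :=
  (PySem.List.pyRange 0 A.length 1).all (fun i =>
    (PySem.List.pyGetD A i 0 == 1 || PySem.List.pyGetD A i 0 == 0) &&
    (PySem.List.pyGetD B i 0 == 1 || PySem.List.pyGetD B i 0 == 0))

def NOT (A : List Int) : List Int :=
  if binaryCheck A A then
    (PySem.List.pyRange 0 A.length 1).foldl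
      (fun result i => result ++ [if PySem.List.pyGetD A i 0 == 1 then (0 : Int) else 1]) []
  else []  -- binary_check raises ValueError here (outside Pre_NOT)

-- ===== PORT B =====
-- single validate-and-invert pass; the raise branch (outside Pre_NOT) yields no value
def notAltGo : List Int → List Int
  | [] => []
  | x :: xs => if x ≠ 0 ∧ x ≠ 1 then [] else (1 - x) :: notAltGo xs

def NOT_alt (A : List Int) : List Int := notAltGo A

-- ===== PRECONDITION & SPEC =====
-- Pre_NOT: every element is 0 or 1; on anything else the Python A raises ValueError.
def Pre_NOT (A : List Int) : Prop := ∀ x ∈ A, x = 0 ∨ x = 1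
instance (A : List Int) : Decidable (Pre_NOT A) := by unfold Pre_NOT; infer_instance

def pvWitness_NOT : List Int := [0, 1, 1, 0]

def Spec_NOT (A : List Int) (out : List Int) : Prop := out = NOT_alt A
instance (A : List Int) (out : List Int) : Decidable (Spec_NOT A out) := by unfold Spec_NOT; infer_instance

-- ===== CLAIM (what is proved, stated in full; the proofs are below) =====
def Claim_equal_NOT : Prop := ∀ (A : List Int), Dom_NOT A → Pre_NOT A → Spec_NOT A (NOT A)

-- ===== LEMMAS AND PROOFS =====

lemma binaryCheck_of_pre (A : List Int) (h : Pre_NOT A) : binaryCheck A A = true := by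
  unfold binaryCheck
  rw [List.all_eq_true]
  intro i hi
  rw [PySem.List.mem_pyRange_one] at hi
  have hmem : PySem.List.pyGetD A i 0 ∈ A :=
    PySem.List.pyGetD_mem A 0 (by simp only [PySem.Raise.InRange]; omega)
  rcases h _ hmem with h0 | h0 <;> simp [h0]

lemma notAltGo_eq_map (A : List Int) (h : Pre_NOT A) :
    notAltGo A = A.map (fun x => if x == 1 then (0 : Int) else 1) := by
  induction A with
  | nil => rfl
  | cons x xs ih =>
    have hx := h x (List.mem_cons_self ..)
    have hxs : Pre_NOT xs := fun y hy => h y (List.mem_cons_of_mem _ hy)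
    rcases hx with rfl | rfl <;>
      simp [notAltGo, ih hxs]

-- ===== VERDICT (by name: the statement is the Claim_ definition above) =====
theorem NOT_spec : Claim_equal_NOT := by
  intro A _ hpre
  unfold Spec_NOT NOT NOT_alt
  rw [binaryCheck_of_pre A hpre, if_pos rfl, notAltGo_eq_map A hpre]
  have := PySem.List.foldl_pyRange_zero_pyGetD
    (f := fun (r : List Int) (x : Int) => r ++ [if x == 1 then (0 : Int) else 1])
    (xs := A) (d := 0) (init := [])
  simp only [PySem.List.len] at this
  rw [this, PySem.List.foldl_append_singleton_eq_map, List.nil_append]
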